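-- pv_equiv track=rewrite | github.com/srinicoder035/Security-Lab | Security Lab/Experiment 9/rsa.py | getPublicKey2
-- ===== SOURCE A (Python) =====
-- def gcd(a,b):
--     while(b):
--         a , b = b , a % b
--     return a
--
-- def phi(n):
--     result = 1
--     for i in range(2,n):
--         if gcd(i,n) == 1:
--             result+=1
--     return result
--
-- def getPublicKey2(n):
--     totient = phi(n)
--     i = n - 1
--     while i > 0:
--         if gcd(i,totient) == 1:
--             return i
--         i -= 1
--     raise "Co prime of the number not found"
-- ===== SOURCE B (Python) =====
-- def _gcd(a, b):
--     return a if b == 0 else _gcd(b, a % b)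
--
-- def getPublicKey2(n):
--     # Euler totient via trial-division prime factorization: O(sqrt n)
--     m = n
--     tot = n
--     p = 2
--     while p * p <= m:
--         if m % p == 0:
--             while m % p == 0:
--                 m //= p
--             tot -= tot // p
--         p += 1
--     if m > 1:
--         tot -= tot // m
--     e = n - 1
--     while e > 0:
--         if _gcd(e, tot) == 1:
--             return e
--         e -= 1
-- ===== Notes on version B (the rewrite author's own statement) =====
-- stated objective: faster
-- what changed: A computes the Euler totient by running a Euclid gcd against every i in range(2,n); B computes the same totient by trial-division prime factorization of n (divide out each prime p <= sqrt(n) and apply tot -= tot//p), then runs the same downward coprime search.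
-- outside the precondition, e.g. on getPublicKey2(1): A raises TypeError, B returns None
import Mathlib
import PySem

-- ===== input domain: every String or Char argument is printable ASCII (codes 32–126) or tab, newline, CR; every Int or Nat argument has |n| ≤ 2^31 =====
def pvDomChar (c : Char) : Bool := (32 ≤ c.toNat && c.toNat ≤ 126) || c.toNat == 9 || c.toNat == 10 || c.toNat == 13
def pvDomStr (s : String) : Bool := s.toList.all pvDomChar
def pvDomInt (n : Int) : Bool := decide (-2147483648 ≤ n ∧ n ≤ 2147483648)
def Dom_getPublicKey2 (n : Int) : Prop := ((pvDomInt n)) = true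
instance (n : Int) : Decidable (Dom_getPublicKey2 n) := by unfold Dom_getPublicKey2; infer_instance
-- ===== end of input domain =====

-- B replaces A's O(n log n) gcd-counting Euler totient with O(√n) trial-division factorization; return value only.

-- ===== PORT A =====
-- termination helper for the Euclid loops of both ports (cited by their decreasing_by)
theorem pv_mod_natAbs_lt (a b : Int) (h : b ≠ 0) : (PySem.Int.mod a b).natAbs < b.natAbs := by
  rcases lt_trichotomy b 0 with hb | hb | hb
  · have := PySem.Int.mod_neg_bounds a hb; omega
  · exact absurd hb h
  · have h1 := PySem.Int.mod_nonneg a hb; have h2 := PySem.Int.mod_lt a hb; omega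

-- def gcd(a,b): while(b): a, b = b, a % b; return a
def gcdA (a b : Int) : Int :=
  if h : b = 0 then a else gcdA b (PySem.Int.mod a b)
termination_by b.natAbs
decreasing_by exact pv_mod_natAbs_lt a b h

-- the 'while i > 0' search in getPublicKey2; 0 stands for the unreachable fall-through
-- (Python raises there; Pre_ excludes those inputs)
def searchA (t i : Int) : Int :=
  if h : 0 < i then (if gcdA i t = 1 then i else searchA t (i - 1)) else 0
termination_by i.toNat
decreasing_by omega

-- phi(n): result = 1; for i in range(2, n): if gcd(i, n) == 1: result += 1
def getPublicKey2 (n : Int) : Int :=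
  let totient := (PySem.List.pyRange 2 n).foldl
    (fun result i => if gcdA i n = 1 then result + 1 else result) 1
  searchA totient (n - 1)

-- ===== PORT B =====
def gcdB (a b : Int) : Int :=
  if h : b = 0 then a else gcdB b (PySem.Int.mod a b)
termination_by b.natAbs
decreasing_by exact pv_mod_natAbs_lt a b h

-- termination helpers for the ports below (cited by the decreasing_by of stripB/phiLoopB)
theorem pv_ediv_lt (m p : Int) (hm : 0 < m) (hp : 2 ≤ p) : m / p < m := by
  have h := Int.mul_ediv_add_emod m p
  have hr := Int.emod_nonneg m (show p ≠ 0 by omega)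
  rcases le_or_gt (m / p) 0 with hq | hq
  · omega
  · nlinarith

theorem pv_lt_add_two (p m : Int) (h : p * p ≤ m) : p < m + 2 := by
  nlinarith [mul_self_nonneg p, mul_self_nonneg (p - 1)]

-- inner 'while m % p == 0: m //= p'; the '2 ≤ p ∧ 0 < m' guard is for totality only:
-- every call site has p ≥ 2 and m ≥ 4, where the guard is exactly Python's 'm % p == 0'
def stripB (p m : Int) : Int :=
  if h : 2 ≤ p ∧ 0 < m ∧ PySem.Int.mod m p = 0 then stripB p (PySem.Int.floordiv m p) else m
termination_by m.toNat
decreasing_by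
  have h2 : PySem.Int.floordiv m p = m / p := PySem.Int.floordiv_eq_ediv_of_pos (by omega)
  have h3 : m / p < m := pv_ediv_lt m p h.2.1 h.1
  have h4 : 0 ≤ m / p := Int.ediv_nonneg (by omega) (by omega)
  omega

theorem stripB_le (p m : Int) : stripB p m ≤ m := by
  induction h : m.toNat using Nat.strong_induction_on generalizing m with
  | _ k ih =>
    rw [stripB]; split
    · next hc =>
      have h2 : PySem.Int.floordiv m p = m / p := PySem.Int.floordiv_eq_ediv_of_pos (by omega)
      have h3 : m / p < m := pv_ediv_lt m p hc.2.1 hc.1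
      have h4 : 0 ≤ m / p := Int.ediv_nonneg (by omega) (by omega)
      have h5 := ih (PySem.Int.floordiv m p).toNat (by omega) (PySem.Int.floordiv m p) rfl
      omega
    · exact le_refl m

-- outer 'while p * p <= m' loop of B's totient; returns (m, tot) at exit
def phiLoopB (p m tot : Int) : Int × Int :=
  if h : p * p ≤ m then
    if PySem.Int.mod m p = 0 then
      phiLoopB (p + 1) (stripB p m) (tot - PySem.Int.floordiv tot p)
    else
      phiLoopB (p + 1) m tot
  else (m, tot)
termination_by (m + 2 - p).toNat
decreasing_by
  · have hs : stripB p m ≤ m := stripB_le p m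
    have hp : p < m + 2 := pv_lt_add_two p m h
    omega
  · have hp : p < m + 2 := pv_lt_add_two p m h
    omega

-- the 'while e > 0' search; 0 stands for the fall-through (None), unreachable under Pre_
def searchB (t e : Int) : Int :=
  if h : 0 < e then (if gcdB e t = 1 then e else searchB t (e - 1)) else 0
termination_by e.toNat
decreasing_by omega

def getPublicKey2_alt (n : Int) : Int :=
  let r := phiLoopB 2 n n
  let tot := if 1 < r.1 then r.2 - PySem.Int.floordiv r.2 r.1 else r.2
  searchB tot (n - 1)

-- ===== PRECONDITION & SPEC =====
-- Pre_ excludes n ≤ 1: there A's final 'raise' is reached (TypeError) and B falls off returning None.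
def Pre_getPublicKey2 (n : Int) : Prop := 2 ≤ n
instance (n : Int) : Decidable (Pre_getPublicKey2 n) := by unfold Pre_getPublicKey2; infer_instance
def pvWitness_getPublicKey2 : Int := (10)

def Spec_getPublicKey2 (n : Int) (out : Int) : Prop := out = getPublicKey2_alt n
instance (n : Int) (out : Int) : Decidable (Spec_getPublicKey2 n out) := by unfold Spec_getPublicKey2; infer_instance

-- ===== CLAIM (what is proved, stated in full; the proofs are below) =====
def Claim_equal_getPublicKey2 : Prop := ∀ (n : Int), Dom_getPublicKey2 n → Pre_getPublicKey2 n → Spec_getPublicKey2 n (getPublicKey2 n)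

-- ===== LEMMAS AND PROOFS =====

theorem gcdB_eq_gcdA (a b : Int) : gcdB a b = gcdA a b := by
  induction h : b.natAbs using Nat.strong_induction_on generalizing a b with
  | _ k ih =>
    rw [gcdA, gcdB]
    split
    · rfl
    · next hb => exact ih (PySem.Int.mod a b).natAbs (h ▸ pv_mod_natAbs_lt a b hb) b _ rfl

theorem searchB_eq_searchA (t i : Int) : searchB t i = searchA t i := by
  induction h : i.toNat using Nat.strong_induction_on generalizing i with
  | _ k ih =>
    rw [searchA, searchB]
    split
    · next hi =>
      rw [gcdB_eq_gcdA]
      split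
      · rfl
      · exact ih (i - 1).toNat (by omega) (i - 1) rfl
    · rfl

-- A's gcd is Nat.gcd on nonnegative inputs
theorem gcdA_natCast (a b : Nat) : gcdA (a : Int) (b : Int) = (Nat.gcd a b : Int) := by
  induction b using Nat.strong_induction_on generalizing a with
  | _ b ih =>
    rw [gcdA]
    split
    · next h =>
      have hb : b = 0 := by exact_mod_cast h
      subst hb; simp
    · next h =>
      have hb : 0 < b := by
        rcases Nat.eq_zero_or_pos b with h0 | h0
        · exact absurd (by exact_mod_cast h0 : (b : Int) = 0) h
        · exact h0
      rw [PySem.Int.mod_natCast, ih (a % b) (Nat.mod_lt a hb) b,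
        Nat.gcd_comm a b, Nat.gcd_rec b a, Nat.gcd_comm (a % b) b]

-- ---- A side: the counting loop computes Nat.totient ----

theorem countP_range_eq (N : Nat) (p : Nat → Bool) :
    (List.range N).countP p = ((Finset.range N).filter (fun k => p k = true)).card := by
  induction N with
  | zero => simp
  | succ n ih =>
    rw [List.range_succ, Finset.range_add_one, List.countP_append, Finset.filter_insert]
    by_cases h : p n = true
    · rw [if_pos h, Finset.card_insert_of_notMem (by simp)]
      simp [h, ih]
    · rw [if_neg h]
      simp [h, ih]


theorem phiA_eq_totient (N : Nat) (hN : 2 ≤ N) :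
    (PySem.List.pyRange 2 (N : Int)).foldl
      (fun result i => if gcdA i (N : Int) = 1 then result + 1 else result) 1
      = (Nat.totient N : Int) := by
  have hN2 : (2 : Int) ≤ (N : Int) := by exact_mod_cast hN
  have hfun : (fun (result : Int) (i : Int) => if gcdA i (N : Int) = 1 then result + 1 else result)
      = fun result i => if (fun j => decide (gcdA j (N : Int) = 1)) i = true then result + 1
          else result := by
    funext r i; by_cases h : gcdA i (N : Int) = 1 <;> simp [h]
  rw [hfun, PySem.List.foldl_count_if]
  have h01 : PySem.List.pyRange 0 (N : Int) = 0 :: 1 :: PySem.List.pyRange 2 (N : Int) := by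
    rw [PySem.List.pyRange_one_cons (show (0 : Int) < (N : Int) by omega),
      PySem.List.pyRange_one_cons (show (0 : Int) + 1 < (N : Int) by omega)]
    norm_num
  have hsplit : (PySem.List.pyRange 0 (N : Int)).countP (fun j => decide (gcdA j (N : Int) = 1))
      = (PySem.List.pyRange 2 (N : Int)).countP (fun j => decide (gcdA j (N : Int) = 1)) + 1 := by
    rw [h01, List.countP_cons, List.countP_cons]
    have hg0 : gcdA (0 : Int) (N : Int) = (N : Int) := by
      rw [show ((0 : Int)) = ((0 : Nat) : Int) by norm_num, gcdA_natCast, Nat.gcd_zero_left]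
    have hg1 : gcdA (1 : Int) (N : Int) = 1 := by
      rw [show ((1 : Int)) = ((1 : Nat) : Int) by norm_num, gcdA_natCast, Nat.gcd_one_left]
    have hN1 : (N : Int) ≠ 1 := by omega
    simp [hg0, hg1, hN1]
  have hpredN : ((fun j => decide (gcdA j (N : Int) = 1)) ∘ fun (k : Nat) => (k : Int))
      = fun k => decide (N.Coprime k) := by
    funext k
    simp only [Function.comp_apply, gcdA_natCast k N, Nat.Coprime, Nat.gcd_comm k N]
    by_cases h : Nat.gcd N k = 1
    · simp [h]
    · simp only [h, decide_false, decide_eq_false_iff_not]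
      intro h0
      exact absurd (by exact_mod_cast h0) h
  have htot : (PySem.List.pyRange 0 (N : Int)).countP (fun j => decide (gcdA j (N : Int) = 1))
      = Nat.totient N := by
    rw [PySem.List.pyRange_zero_natCast, List.countP_map, hpredN, countP_range_eq,
      Nat.totient_eq_card_coprime]
    congr 1
    apply Finset.filter_congr
    intro x _
    simp
  omega

-- ---- B side: Nat shadows of the Int loops ----

def stripN (p m : Nat) : Nat :=
  if h : 2 ≤ p ∧ 0 < m ∧ m % p = 0 then stripN p (m / p) else m
termination_by m
decreasing_by exact Nat.div_lt_self h.2.1 (by omega)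

theorem stripN_le (p m : Nat) : stripN p m ≤ m := by
  induction m using Nat.strong_induction_on with
  | _ m ih =>
    rw [stripN]
    split
    · next h => exact le_trans (ih _ (Nat.div_lt_self h.2.1 (by omega))) (Nat.div_le_self m p)
    · exact le_refl m

theorem pvNat_lt_add_two (p m : Nat) (h : p * p ≤ m) : p < m + 2 := by nlinarith

def phiLoopN (p m tot : Nat) : Nat × Nat :=
  if h : p * p ≤ m then
    if m % p = 0 then
      phiLoopN (p + 1) (stripN p m) (tot - tot / p)
    else
      phiLoopN (p + 1) m tot
  else (m, tot)
termination_by m + 2 - p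
decreasing_by
  · have hs : stripN p m ≤ m := stripN_le p m
    have hp : p < m + 2 := pvNat_lt_add_two p m h
    omega
  · have hp : p < m + 2 := pvNat_lt_add_two p m h
    omega

theorem stripB_natCast (p m : Nat) : stripB (p : Int) (m : Int) = (stripN p m : Int) := by
  induction m using Nat.strong_induction_on with
  | _ m ih =>
    have hmod := PySem.Int.mod_natCast m p
    rw [stripB, stripN]
    split
    · next h =>
      have hc : 2 ≤ p ∧ 0 < m ∧ m % p = 0 := by
        refine ⟨by exact_mod_cast h.1, by exact_mod_cast h.2.1, ?_⟩
        have := h.2.2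
        rw [hmod] at this
        exact_mod_cast this
      rw [dif_pos hc, PySem.Int.floordiv_natCast]
      exact ih (m / p) (Nat.div_lt_self hc.2.1 (by omega))
    · next h =>
      have hc : ¬ (2 ≤ p ∧ 0 < m ∧ m % p = 0) := by
        intro hc
        exact h ⟨by exact_mod_cast hc.1, by exact_mod_cast hc.2.1,
          by rw [hmod]; exact_mod_cast hc.2.2⟩
      rw [dif_neg hc]

theorem phiLoopB_natCast (p m tot : Nat) :
    phiLoopB (p : Int) (m : Int) (tot : Int) =
      (((phiLoopN p m tot).1 : Int), ((phiLoopN p m tot).2 : Int)) := by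
  induction hk : m + 2 - p using Nat.strong_induction_on generalizing p m tot with
  | _ k ih =>
    have hmod := PySem.Int.mod_natCast m p
    rw [phiLoopB, phiLoopN]
    split
    · next h =>
      have hc : p * p ≤ m := by exact_mod_cast h
      have hp2 : p < m + 2 := pvNat_lt_add_two p m hc
      rw [dif_pos hc]
      split
      · next hd =>
        have hdn : m % p = 0 := by rw [hmod] at hd; exact_mod_cast hd
        have hs := stripN_le p m
        have h5 := ih (stripN p m + 2 - (p + 1)) (by omega) (p + 1) (stripN p m)
          (tot - tot / p) rfl
        rw [if_pos hdn, stripB_natCast, PySem.Int.floordiv_natCast,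
          show ((tot : Int) - ((tot / p : Nat) : Int)) = ((tot - tot / p : Nat) : Int) from
            (Nat.cast_sub (Nat.div_le_self tot p)).symm]
        push_cast at h5
        exact h5
      · next hd =>
        have hdn : ¬ m % p = 0 := by intro h0; exact hd (by rw [hmod]; exact_mod_cast h0)
        have h5 := ih (m + 2 - (p + 1)) (by omega) (p + 1) m tot rfl
        rw [if_neg hdn]
        push_cast at h5
        exact h5
    · next h =>
      have hc : ¬ p * p ≤ m := by intro h0; exact h (by exact_mod_cast h0)
      rw [dif_neg hc]

-- stripN divides out exactly the p-part
theorem stripN_spec (p m : Nat) (hp : 2 ≤ p) (hm : 0 < m) :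
    ∃ e : Nat, m = p ^ e * stripN p m ∧ ¬ p ∣ stripN p m ∧ 0 < stripN p m := by
  induction m using Nat.strong_induction_on with
  | _ m ih =>
    rw [stripN]
    split
    · next h =>
      have hdvd : p ∣ m := Nat.dvd_of_mod_eq_zero h.2.2
      have hdiv_pos : 0 < m / p := Nat.div_pos (Nat.le_of_dvd h.2.1 hdvd) (by omega)
      obtain ⟨e, he, hnd, hpos⟩ := ih (m / p) (Nat.div_lt_self h.2.1 (by omega)) hdiv_pos
      refine ⟨e + 1, ?_, hnd, hpos⟩
      calc m = p * (m / p) := (Nat.mul_div_cancel' hdvd).symm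
        _ = p * (p ^ e * stripN p (m / p)) := by rw [← he]
        _ = p ^ (e + 1) * stripN p (m / p) := by ring
    · next h =>
      refine ⟨0, by simp, ?_, hm⟩
      intro hdvd
      exact h ⟨hp, hm, Nat.mod_eq_zero_of_dvd hdvd⟩

def finalizeN (r : Nat × Nat) : Nat := if 1 < r.1 then r.2 - r.2 / r.1 else r.2

theorem phiLoopN_correct (p m k : Nat) (hp : 2 ≤ p) (hm : 0 < m)
    (hfac : ∀ q : Nat, q.Prime → q ∣ m → p ≤ q) :
    finalizeN (phiLoopN p m (k * m)) = k * Nat.totient m := by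
  induction hK : m + 2 - p using Nat.strong_induction_on generalizing p m k with
  | _ K ih =>
    rw [phiLoopN]
    split
    · next hle =>
      have hp2 : p < m + 2 := pvNat_lt_add_two p m hle
      split
      · next hd =>
        -- p divides m: strip out p^e, update the totient accumulator
        have hdvd : p ∣ m := Nat.dvd_of_mod_eq_zero hd
        have hpp : p.Prime := by
          have h1 := Nat.minFac_prime (show p ≠ 1 by omega)
          have h2 := hfac p.minFac h1 ((Nat.minFac_dvd p).trans hdvd)
          have h3 := Nat.minFac_le (show 0 < p by omega)
          have h4 : p.minFac = p := le_antisymm h3 h2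
          rwa [← h4]
        obtain ⟨e, he, hnd, hspos⟩ := stripN_spec p m hp hm
        have hsle := stripN_le p m
        set s := stripN p m with hs
        obtain ⟨e', rfl⟩ : ∃ e', e = e' + 1 := by
          rcases Nat.eq_zero_or_pos e with h0 | h0
          · subst h0; rw [pow_zero, one_mul] at he; exact absurd (he ▸ hdvd) hnd
          · exact ⟨e - 1, by omega⟩
        have hmid : (k * m) / p = k * (p ^ e' * s) := by
          rw [he, pow_succ, show k * (p ^ e' * p * s) = p * (k * (p ^ e' * s)) by ring]
          exact Nat.mul_div_cancel_left _ (by omega)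
        have hX : k * m = k * (p ^ e' * s) * p := by rw [he, pow_succ]; ring
        have harith : k * m - (k * m) / p = (k * Nat.totient (p ^ (e' + 1))) * s := by
          calc k * m - (k * m) / p = k * (p ^ e' * s) * p - k * (p ^ e' * s) := by
                rw [hmid, hX]
            _ = k * (p ^ e' * s) * (p - 1) := by rw [Nat.mul_sub, Nat.mul_one]
            _ = (k * Nat.totient (p ^ (e' + 1))) * s := by
                rw [Nat.totient_prime_pow hpp (Nat.succ_pos e'), Nat.succ_sub_one]
                ring
        have hfac' : ∀ q : Nat, q.Prime → q ∣ s → p + 1 ≤ q := by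
          intro q hq hqs
          have h1 : q ∣ m := he ▸ Dvd.dvd.mul_left hqs _
          have h2 := hfac q hq h1
          rcases Nat.lt_or_ge p q with h3 | h3
          · omega
          · exfalso; exact hnd (le_antisymm h2 h3 ▸ hqs)
        have hcop : Nat.Coprime (p ^ (e' + 1)) s :=
          Nat.Coprime.pow_left _ ((Nat.Prime.coprime_iff_not_dvd hpp).mpr hnd)
        rw [harith, ih (s + 2 - (p + 1)) (by omega) (p + 1) s
          (k * Nat.totient (p ^ (e' + 1))) (by omega) hspos hfac' rfl]
        rw [he, Nat.totient_mul hcop]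
        ring
      · next hd =>
        have hfac' : ∀ q : Nat, q.Prime → q ∣ m → p + 1 ≤ q := by
          intro q hq hqm
          have h2 := hfac q hq hqm
          rcases Nat.lt_or_ge p q with h3 | h3
          · omega
          · exfalso; exact hd (Nat.mod_eq_zero_of_dvd (le_antisymm h2 h3 ▸ hqm))
        exact ih (m + 2 - (p + 1)) (by omega) (p + 1) m k (by omega) hm hfac' rfl
    · next hle =>
      unfold finalizeN
      by_cases hm1 : 1 < m
      · have hmp : m.Prime := by
          by_contra hnp
          have h1 := Nat.minFac_sq_le_self (show 0 < m by omega) hnp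
          have h2 := hfac m.minFac (Nat.minFac_prime (by omega)) (Nat.minFac_dvd m)
          have h3 : p * p ≤ m.minFac * m.minFac := Nat.mul_le_mul h2 h2
          rw [show m.minFac ^ 2 = m.minFac * m.minFac by ring] at h1
          omega
        rw [if_pos hm1]
        simp only
        rw [Nat.mul_div_cancel k (show 0 < m by omega), Nat.totient_prime hmp,
          Nat.mul_sub, Nat.mul_one]
      · rw [if_neg hm1]
        have hm1' : m = 1 := by omega
        subst hm1'
        simp

-- ===== VERDICT (by name: the statement is the Claim_ definition above) =====
theorem getPublicKey2_spec : Claim_equal_getPublicKey2 := by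
  intro n _ hn
  unfold Spec_getPublicKey2
  have hn2 : (2 : Int) ≤ n := hn
  obtain ⟨N, rfl⟩ : ∃ N : Nat, n = (N : Int) := ⟨n.toNat, (Int.toNat_of_nonneg (by omega)).symm⟩
  have hN : 2 ≤ N := by exact_mod_cast hn2
  simp only [getPublicKey2, getPublicKey2_alt]
  have hB := phiLoopB_natCast 2 N N
  rw [show ((2 : Nat) : Int) = (2 : Int) by norm_num] at hB
  have hcor := phiLoopN_correct 2 N 1 (le_refl 2) (by omega) (fun q hq _ => hq.two_le)
  rw [one_mul, one_mul] at hcor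
  rw [hB]
  have hfin : (if (1 : Int) < ((phiLoopN 2 N N).1 : Int)
        then ((phiLoopN 2 N N).2 : Int)
          - PySem.Int.floordiv ((phiLoopN 2 N N).2 : Int) ((phiLoopN 2 N N).1 : Int)
        else ((phiLoopN 2 N N).2 : Int))
      = ((finalizeN (phiLoopN 2 N N) : Nat) : Int) := by
    unfold finalizeN
    by_cases h : 1 < (phiLoopN 2 N N).1
    · rw [if_pos (by exact_mod_cast h), if_pos h, PySem.Int.floordiv_natCast,
        Nat.cast_sub (Nat.div_le_self _ _)]
    · rw [if_neg (by exact_mod_cast h), if_neg h]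
  rw [hfin, hcor, phiA_eq_totient N hN, searchB_eq_searchA]
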